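-- pv_equiv track=rewrite | github.com/itripathiharsh/ShieldAi | main.py | _infer_category_from_name
-- ===== SOURCE A (Python) =====
-- def _infer_category_from_name(name):
--     """Infer category based on product name keywords"""
--     name = name.lower()
--     if any(keyword in name for keyword in ['shirt', 't-shirt', 'jeans', 'jacket', 'hoodie']):
--         return 'Clothing'
--     elif any(keyword in name for keyword in ['phone', 'laptop', 'headphones', 'camera']):
--         return 'Electronics'
--     elif any(keyword in name for keyword in ['sofa', 'table', 'lamp', 'mattress']):
--         return 'Home'
--     elif any(keyword in name for keyword in ['cream', 'lotion', 'shampoo', 'perfume']):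
--         return 'Beauty'
--     elif any(keyword in name for keyword in ['shoe', 'sneaker', 'boot', 'heel']):
--         return 'Shoes'
--     return None
-- ===== SOURCE B (Python) =====
-- _KEYWORD_PRIORITY = {
--     'shirt': 0, 't-shirt': 0, 'jeans': 0, 'jacket': 0, 'hoodie': 0,
--     'phone': 1, 'laptop': 1, 'headphones': 1, 'camera': 1,
--     'sofa': 2, 'table': 2, 'lamp': 2, 'mattress': 2,
--     'cream': 3, 'lotion': 3, 'shampoo': 3, 'perfume': 3,
--     'shoe': 4, 'sneaker': 4, 'boot': 4, 'heel': 4,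
-- }
-- _CATEGORIES = ['Clothing', 'Electronics', 'Home', 'Beauty', 'Shoes']
--
-- def _infer_category_from_name(name):
--     s = name.lower()
--     best = None
--     for i in range(len(s)):
--         for kw, pri in _KEYWORD_PRIORITY.items():
--             if s.startswith(kw, i) and (best is None or pri < best):
--                 best = pri
--     return _CATEGORIES[best] if best is not None else None
-- ===== Notes on version B (the rewrite author's own statement) =====
-- stated objective: alternative
-- what changed: Instead of testing whole-string substring containment per category branch, B scans the lowered name position by position, matching keywords as prefixes at each index against a single keyword-to-priority map and keeping the minimal matched category index, then indexes the category list once at the end.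
import Mathlib
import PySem

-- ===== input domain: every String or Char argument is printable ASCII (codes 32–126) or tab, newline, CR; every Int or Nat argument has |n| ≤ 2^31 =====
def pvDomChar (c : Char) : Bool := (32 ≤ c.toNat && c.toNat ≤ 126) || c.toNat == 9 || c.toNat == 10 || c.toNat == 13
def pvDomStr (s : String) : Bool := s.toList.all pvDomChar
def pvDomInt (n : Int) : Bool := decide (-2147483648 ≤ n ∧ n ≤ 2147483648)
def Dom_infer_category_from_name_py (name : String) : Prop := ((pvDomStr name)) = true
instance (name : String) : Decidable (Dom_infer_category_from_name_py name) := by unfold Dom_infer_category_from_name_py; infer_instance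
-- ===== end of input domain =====

-- B replaces A's per-category if/elif keyword cascade by a single positional scan of the name (startswith at each index against one keyword→priority map), keeping the minimal matched priority; alternative algorithm, same behaviour.


-- ===== PORT A =====
def infer_category_from_name_py (name : String) : Option String :=
  let name := PySem.Str.lower name
  if (["shirt", "t-shirt", "jeans", "jacket", "hoodie"].any
        fun keyword => PySem.Str.isIn keyword name) then
    some "Clothing"
  else if (["phone", "laptop", "headphones", "camera"].any
        fun keyword => PySem.Str.isIn keyword name) then
    some "Electronics"
  else if (["sofa", "table", "lamp", "mattress"].any
        fun keyword => PySem.Str.isIn keyword name) then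
    some "Home"
  else if (["cream", "lotion", "shampoo", "perfume"].any
        fun keyword => PySem.Str.isIn keyword name) then
    some "Beauty"
  else if (["shoe", "sneaker", "boot", "heel"].any
        fun keyword => PySem.Str.isIn keyword name) then
    some "Shoes"
  else
    none

-- ===== PORT B =====
-- _KEYWORD_PRIORITY: dict keyword -> category index (association list, insertion order)
def kwPriority : List (String × Nat) :=
  [("shirt", 0), ("t-shirt", 0), ("jeans", 0), ("jacket", 0), ("hoodie", 0),
   ("phone", 1), ("laptop", 1), ("headphones", 1), ("camera", 1),
   ("sofa", 2), ("table", 2), ("lamp", 2), ("mattress", 2),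
   ("cream", 3), ("lotion", 3), ("shampoo", 3), ("perfume", 3),
   ("shoe", 4), ("sneaker", 4), ("boot", 4), ("heel", 4)]

def categories : List String := ["Clothing", "Electronics", "Home", "Beauty", "Shoes"]

-- B: scan every position i of the lowered name; s.startswith(kw, i) is "kw is a prefix of s[i:]";
-- keep the minimal matched priority; index _CATEGORIES at the end.
def infer_category_from_name_py_alt (name : String) : Option String :=
  let s := (PySem.Str.lower name).toList
  let best : Option Nat :=
    (List.range s.length).foldl (fun best i =>
      kwPriority.foldl (fun best kp =>
        if kp.1.toList.isPrefixOf (s.drop i)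
            && (match best with | none => true | some b => decide (kp.2 < b)) then
          some kp.2
        else best) best) none
  match best with
  | some b => PySem.List.pyGet? categories (Int.ofNat b)
  | none => none

-- ===== PRECONDITION & SPEC =====
def Spec_infer_category_from_name_py (name : String) (out : Option String) : Prop := out = infer_category_from_name_py_alt name
instance (name : String) (out : Option String) : Decidable (Spec_infer_category_from_name_py name out) := by unfold Spec_infer_category_from_name_py; infer_instance

-- ===== CLAIM (what is proved, stated in full; the proofs are below) =====
def Claim_equal_infer_category_from_name_py : Prop := ∀ (name : String), Dom_infer_category_from_name_py name → Spec_infer_category_from_name_py name (infer_category_from_name_py name)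

-- ===== LEMMAS AND PROOFS =====

-- the bare min-update step of B's fold
def pvMinStep (b : Option Nat) (p : Nat) : Option Nat :=
  if (match b with | none => true | some x => decide (p < x)) then some p else b

-- B's guarded inner fold is the min-update fold over the list of matched priorities
theorem pvFoldGuard (l : List (String × Nat)) (g : String × Nat → Bool) (b : Option Nat) :
    l.foldl (fun b kp =>
      if g kp && (match b with | none => true | some x => decide (kp.2 < x)) then some kp.2 else b) b
      = (l.filterMap (fun kp => if g kp then some kp.2 else none)).foldl pvMinStep b := by
  induction l generalizing b with
  | nil => rfl
  | cons a l ih =>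
    simp only [List.foldl_cons, List.filterMap_cons]
    by_cases h : g a = true
    · simp only [h, Bool.true_and, if_pos, List.foldl_cons]
      rw [ih]
      rfl
    · simp only [h, Bool.false_and, Bool.false_eq_true, ite_false]
      exact ih b

-- an outer fold of inner folds is one fold over the flattened list
theorem pvFoldFlat (L : List Nat) (h : Nat → List Nat) (b : Option Nat) :
    L.foldl (fun b i => (h i).foldl pvMinStep b) b = (L.flatMap h).foldl pvMinStep b := by
  induction L generalizing b with
  | nil => rfl
  | cons a L ih => simp [List.flatMap_cons, List.foldl_append, ih]

theorem pvMinStep_some (l : List Nat) (a : Nat) :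
    l.foldl pvMinStep (some a) = some (l.foldl min a) := by
  induction l generalizing a with
  | nil => rfl
  | cons x l ih =>
    have : pvMinStep (some a) x = some (min a x) := by
      simp only [pvMinStep]; split_ifs with h <;> simp_all <;> omega
    simp [List.foldl_cons, this, ih]

theorem pvMinStep_none (l : List Nat) : l.foldl pvMinStep none = l.min? := by
  cases l with
  | nil => rfl
  | cons a l => simp [List.foldl_cons, pvMinStep, pvMinStep_some, List.min?]

-- the flattened list of matched priorities for a string s
def pvMatches (s : List Char) : List Nat :=
  (List.range s.length).flatMap (fun i =>
    kwPriority.filterMap (fun kp => if kp.1.toList.isPrefixOf (s.drop i) then some kp.2 else none))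

theorem pvMem_matches (s : List Char) (p : Nat) :
    p ∈ pvMatches s ↔ ∃ kp ∈ kwPriority, kp.2 = p ∧ PySem.Chars.isIn kp.1.toList s = true := by
  have hne : ∀ kp ∈ kwPriority, kp.1.toList ≠ ([] : List Char) := by decide
  unfold pvMatches
  simp only [List.mem_flatMap, List.mem_filterMap, List.mem_range]
  constructor
  · rintro ⟨i, _, kp, hkp, hif⟩
    by_cases hpre : kp.1.toList.isPrefixOf (s.drop i) = true
    · refine ⟨kp, hkp, by simpa [hpre] using hif, ?_⟩
      rw [← PySem.Chars.exists_prefix_drop_iff_isIn]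
      exact ⟨i, (List.isPrefixOf_iff_prefix).mp hpre⟩
    · simp [hpre] at hif
  · rintro ⟨kp, hkp, hp, hocc⟩
    rw [← PySem.Chars.exists_prefix_drop_iff_isIn] at hocc
    obtain ⟨j, hj⟩ := hocc
    have hjlt : j < s.length := by
      by_contra h
      rw [not_lt] at h
      rw [List.drop_eq_nil_of_le h] at hj
      exact hne kp hkp (List.prefix_nil.mp hj)
    exact ⟨j, hjlt, kp, hkp, by simp [List.isPrefixOf_iff_prefix.mpr hj, hp]⟩

-- B's `best` equals the minimum matched priority
theorem pvBest_eq (s : List Char) :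
    (List.range s.length).foldl (fun best i =>
      kwPriority.foldl (fun best kp =>
        if kp.1.toList.isPrefixOf (s.drop i)
            && (match best with | none => true | some b => decide (kp.2 < b)) then
          some kp.2
        else best) best) none = (pvMatches s).min? := by
  have h1 : ∀ (b : Option Nat),
      (List.range s.length).foldl (fun best i =>
        kwPriority.foldl (fun best kp =>
          if kp.1.toList.isPrefixOf (s.drop i)
              && (match best with | none => true | some b => decide (kp.2 < b)) then
            some kp.2
          else best) best) b = (pvMatches s).foldl pvMinStep b := by
    intro b
    unfold pvMatches
    rw [← pvFoldFlat]
    apply List.foldl_ext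
    intro b i _
    exact pvFoldGuard kwPriority _ b
  rw [h1, pvMinStep_none]

theorem pvMin_branch (s : List Char) (j : Nat) (hmem : j ∈ pvMatches s)
    (hlb : ∀ x ∈ pvMatches s, j ≤ x) : (pvMatches s).min? = some j :=
  List.min?_eq_some_iff.mpr ⟨hmem, hlb⟩

-- ===== VERDICT (by name: the statement is the Claim_ definition above) =====
theorem infer_category_from_name_py_spec : Claim_equal_infer_category_from_name_py := by
  intro name _
  unfold Spec_infer_category_from_name_py infer_category_from_name_py infer_category_from_name_py_alt
  simp only [PySem.Str.isIn_eq, List.any_cons, List.any_nil, Bool.or_false, Bool.or_eq_true]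
  rw [pvBest_eq]
  obtain ⟨s, hs⟩ : ∃ t, t = (PySem.Str.lower name).toList := ⟨_, rfl⟩
  rw [← hs]
  clear hs
  have lb : ∀ (j : Nat), (∀ kp ∈ kwPriority, kp.2 < j →
        PySem.Chars.isIn kp.1.toList s = false) → ∀ x ∈ pvMatches s, j ≤ x := by
    intro j hj x hx
    rw [pvMem_matches] at hx
    obtain ⟨kp, hkp, hkx, hocc⟩ := hx
    by_contra hlt
    rw [hj kp hkp (by omega)] at hocc
    exact Bool.false_ne_true hocc
  split_ifs with h0 h1 h2 h3 h4
  · rw [pvMin_branch s 0 ?_ (lb 0 (by intro kp _ h; omega))]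
    · rfl
    · rcases h0 with h|h|h|h|h
      · exact (pvMem_matches s 0).mpr ⟨("shirt", 0), by decide, rfl, h⟩
      · exact (pvMem_matches s 0).mpr ⟨("t-shirt", 0), by decide, rfl, h⟩
      · exact (pvMem_matches s 0).mpr ⟨("jeans", 0), by decide, rfl, h⟩
      · exact (pvMem_matches s 0).mpr ⟨("jacket", 0), by decide, rfl, h⟩
      · exact (pvMem_matches s 0).mpr ⟨("hoodie", 0), by decide, rfl, h⟩
  · rw [pvMin_branch s 1 ?_ (lb 1 ?_)]
    · rfl
    · rcases h1 with h|h|h|h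
      · exact (pvMem_matches s 1).mpr ⟨("phone", 1), by decide, rfl, h⟩
      · exact (pvMem_matches s 1).mpr ⟨("laptop", 1), by decide, rfl, h⟩
      · exact (pvMem_matches s 1).mpr ⟨("headphones", 1), by decide, rfl, h⟩
      · exact (pvMem_matches s 1).mpr ⟨("camera", 1), by decide, rfl, h⟩
    · intro kp hkp hlt
      clear lb
      simp only [kwPriority, List.mem_cons, List.not_mem_nil, or_false] at hkp
      rcases hkp with rfl|rfl|rfl|rfl|rfl|rfl|rfl|rfl|rfl|rfl|rfl|rfl|rfl|rfl|rfl|rfl|rfl|rfl|rfl|rfl|rfl <;>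
        simp_all
  · rw [pvMin_branch s 2 ?_ (lb 2 ?_)]
    · rfl
    · rcases h2 with h|h|h|h
      · exact (pvMem_matches s 2).mpr ⟨("sofa", 2), by decide, rfl, h⟩
      · exact (pvMem_matches s 2).mpr ⟨("table", 2), by decide, rfl, h⟩
      · exact (pvMem_matches s 2).mpr ⟨("lamp", 2), by decide, rfl, h⟩
      · exact (pvMem_matches s 2).mpr ⟨("mattress", 2), by decide, rfl, h⟩
    · intro kp hkp hlt
      clear lb
      simp only [kwPriority, List.mem_cons, List.not_mem_nil, or_false] at hkp
      rcases hkp with rfl|rfl|rfl|rfl|rfl|rfl|rfl|rfl|rfl|rfl|rfl|rfl|rfl|rfl|rfl|rfl|rfl|rfl|rfl|rfl|rfl <;>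
        simp_all
  · rw [pvMin_branch s 3 ?_ (lb 3 ?_)]
    · rfl
    · rcases h3 with h|h|h|h
      · exact (pvMem_matches s 3).mpr ⟨("cream", 3), by decide, rfl, h⟩
      · exact (pvMem_matches s 3).mpr ⟨("lotion", 3), by decide, rfl, h⟩
      · exact (pvMem_matches s 3).mpr ⟨("shampoo", 3), by decide, rfl, h⟩
      · exact (pvMem_matches s 3).mpr ⟨("perfume", 3), by decide, rfl, h⟩
    · intro kp hkp hlt
      clear lb
      simp only [kwPriority, List.mem_cons, List.not_mem_nil, or_false] at hkp
      rcases hkp with rfl|rfl|rfl|rfl|rfl|rfl|rfl|rfl|rfl|rfl|rfl|rfl|rfl|rfl|rfl|rfl|rfl|rfl|rfl|rfl|rfl <;>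
        simp_all
  · rw [pvMin_branch s 4 ?_ (lb 4 ?_)]
    · rfl
    · rcases h4 with h|h|h|h
      · exact (pvMem_matches s 4).mpr ⟨("shoe", 4), by decide, rfl, h⟩
      · exact (pvMem_matches s 4).mpr ⟨("sneaker", 4), by decide, rfl, h⟩
      · exact (pvMem_matches s 4).mpr ⟨("boot", 4), by decide, rfl, h⟩
      · exact (pvMem_matches s 4).mpr ⟨("heel", 4), by decide, rfl, h⟩
    · intro kp hkp hlt
      clear lb
      simp only [kwPriority, List.mem_cons, List.not_mem_nil, or_false] at hkp
      rcases hkp with rfl|rfl|rfl|rfl|rfl|rfl|rfl|rfl|rfl|rfl|rfl|rfl|rfl|rfl|rfl|rfl|rfl|rfl|rfl|rfl|rfl <;>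
        simp_all
  · have hempty : pvMatches s = [] := by
      rw [List.eq_nil_iff_forall_not_mem]
      intro x hx
      rw [pvMem_matches] at hx
      obtain ⟨kp, hkp, hkx, hocc⟩ := hx
      clear lb
      simp only [kwPriority, List.mem_cons, List.not_mem_nil, or_false] at hkp
      rcases hkp with rfl|rfl|rfl|rfl|rfl|rfl|rfl|rfl|rfl|rfl|rfl|rfl|rfl|rfl|rfl|rfl|rfl|rfl|rfl|rfl|rfl <;>
        simp_all
    rw [hempty]
    rfl
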